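-- pv_equiv track=rewrite | github.com/thanh-tech2809/BMTTNC_NguyenThanhnghia_1448 | cipher/playfair/playfair_cipher.py | remove_x_padding
-- ===== SOURCE A (Python) =====
-- def remove_x_padding(text):
--
--     result = ""
--
--     i = 0
--     while i < len(text):
--
--         if i < len(text) - 2 and text[i+1] == "X" and text[i] == text[i+2]:
--             result += text[i]
--             i += 2
--         else:
--             result += text[i]
--             i += 1
--
--     if result.endswith("X"):
--         result = result[:-1]
--
--     return result
-- ===== SOURCE B (Python) =====
-- import re
--
-- def remove_x_padding(text):
--     s = re.sub(r'(.)X(?=\1)', r'\1', text, flags=re.S)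
--     if s.endswith("X"):
--         s = s[:-1]
--     return s
-- ===== Notes on version B (the rewrite author's own statement) =====
-- stated objective: faster
-- what changed: Replaced the hand-rolled index-jumping while loop with repeated string concatenation by a single regex substitution re.sub(r'(.)X(?=\1)', r'\1', text, flags=re.S) plus the trailing-X strip; the regex engine's non-overlapping left-to-right matching reproduces A's greedy i+=2 scan.
import Mathlib
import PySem

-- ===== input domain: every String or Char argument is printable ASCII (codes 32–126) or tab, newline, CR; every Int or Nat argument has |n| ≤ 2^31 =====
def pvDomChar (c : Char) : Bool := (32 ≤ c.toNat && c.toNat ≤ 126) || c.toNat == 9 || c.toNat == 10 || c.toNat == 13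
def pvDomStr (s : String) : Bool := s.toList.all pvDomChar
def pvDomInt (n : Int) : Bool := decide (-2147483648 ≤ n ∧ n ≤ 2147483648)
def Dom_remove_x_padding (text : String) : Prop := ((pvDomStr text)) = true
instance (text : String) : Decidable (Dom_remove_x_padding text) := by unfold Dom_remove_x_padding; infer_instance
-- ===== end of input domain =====

-- B replaces A's index-jumping while loop (quadratic += string building) by one regex substitution (ported by hand below); measured faster in a timing run.

-- ===== PORT A =====
-- the while loop of A: index i over text, greedy skip of an 'X' between equal letters
def pvGoA (cs : List Char) (i : Nat) : List Char :=
  if _h : i < cs.length then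
    if i < cs.length - 2 ∧ cs.getD (i+1) ' ' = 'X' ∧ cs.getD i ' ' = cs.getD (i+2) ' ' then
      cs.getD i ' ' :: pvGoA cs (i+2)
    else
      cs.getD i ' ' :: pvGoA cs (i+1)
  else []
termination_by cs.length - i

def remove_x_padding (text : String) : String :=
  let result := String.ofList (pvGoA text.toList 0)
  if PySem.Str.endswith result "X" then PySem.Str.slice result none (some (-1)) else result

-- ===== PORT B =====
-- hand port of re.sub(r'(.)X(?=\1)', r'\1', text, flags=re.S): exact for THIS pattern —
-- non-overlapping left-to-right matching; a match needs a char c, an 'X', and a lookahead char equal to c;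
-- the replacement emits c and matching resumes at the lookahead char.
def pvSubB : List Char → List Char
  | c :: x :: d :: rest =>
      if x = 'X' ∧ c = d then c :: pvSubB (d :: rest)
      else c :: pvSubB (x :: d :: rest)
  | l => l
termination_by l => l.length

def remove_x_padding_alt (text : String) : String :=
  let s := String.ofList (pvSubB text.toList)
  if PySem.Str.endswith s "X" then PySem.Str.slice s none (some (-1)) else s

-- ===== PRECONDITION & SPEC =====
def Spec_remove_x_padding (text : String) (out : String) : Prop := out = remove_x_padding_alt text
instance (text : String) (out : String) : Decidable (Spec_remove_x_padding text out) := by unfold Spec_remove_x_padding; infer_instance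

-- ===== CLAIM (what is proved, stated in full; the proofs are below) =====
def Claim_equal_remove_x_padding : Prop := ∀ (text : String), Dom_remove_x_padding text → Spec_remove_x_padding text (remove_x_padding text)

-- ===== LEMMAS AND PROOFS =====

theorem pvSubB_short (l : List Char) (h : l.length ≤ 2) : pvSubB l = l := by
  match l with
  | [] => simp [pvSubB]
  | [_] => simp [pvSubB]
  | [_, _] => simp [pvSubB]
  | _ :: _ :: _ :: _ => simp at h

theorem pvSubB_cons3 (c x d : Char) (l : List Char) :
    pvSubB (c :: x :: d :: l) =
      if x = 'X' ∧ c = d then c :: pvSubB (d :: l) else c :: pvSubB (x :: d :: l) := by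
  rw [pvSubB]

theorem pvGoA_eq_pvSubB (cs : List Char) (i : Nat) : pvGoA cs i = pvSubB (cs.drop i) := by
  have H : ∀ n i, cs.length - i ≤ n → pvGoA cs i = pvSubB (cs.drop i) := by
    intro n
    induction n with
    | zero =>
      intro i hi
      rw [pvGoA, dif_neg (by omega), List.drop_eq_nil_of_le (by omega),
        pvSubB_short _ (by simp)]
    | succ n ihn =>
      intro i hi
      rw [pvGoA]
      by_cases h : i < cs.length
      · rw [dif_pos h]
        by_cases hc : i < cs.length - 2 ∧ cs.getD (i+1) ' ' = 'X' ∧ cs.getD i ' ' = cs.getD (i+2) ' '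
        · rw [if_pos hc]
          obtain ⟨h1, h2, h3⟩ := hc
          have h1' : i + 1 < cs.length := by omega
          have h2' : i + 2 < cs.length := by omega
          have hx : cs[i+1] = 'X' := by rwa [List.getD_eq_getElem _ _ h1'] at h2
          have hd : cs[i] = cs[i+2] := by
            rwa [List.getD_eq_getElem _ _ h, List.getD_eq_getElem _ _ h2'] at h3
          rw [List.drop_eq_getElem_cons h, List.drop_eq_getElem_cons h1',
            List.drop_eq_getElem_cons h2', pvSubB_cons3, if_pos ⟨hx, hd⟩,
            List.getD_eq_getElem _ _ h, ihn (i+2) (by omega),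
            List.drop_eq_getElem_cons h2']
        · rw [if_neg hc, List.getD_eq_getElem _ _ h, ihn (i+1) (by omega)]
          by_cases h2 : i + 2 < cs.length
          · have h1' : i + 1 < cs.length := by omega
            have hcond : ¬(cs[i+1] = 'X' ∧ cs[i] = cs[i+2]) := by
              rintro ⟨a, b⟩
              exact hc ⟨by omega, by rw [List.getD_eq_getElem _ _ h1']; exact a,
                by rw [List.getD_eq_getElem _ _ h, List.getD_eq_getElem _ _ h2]; exact b⟩
            rw [List.drop_eq_getElem_cons h, List.drop_eq_getElem_cons h1',
              List.drop_eq_getElem_cons h2, pvSubB_cons3, if_neg hcond]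
          · rw [pvSubB_short (cs.drop i) (by simp; omega),
              List.drop_eq_getElem_cons h,
              pvSubB_short (cs.drop (i+1)) (by simp; omega)]
      · rw [dif_neg h, List.drop_eq_nil_of_le (by omega), pvSubB_short _ (by simp)]
  exact H (cs.length - i) i le_rfl

theorem remove_x_padding_spec : Claim_equal_remove_x_padding := by
  intro text _
  show remove_x_padding text = remove_x_padding_alt text
  unfold remove_x_padding remove_x_padding_alt
  rw [pvGoA_eq_pvSubB, List.drop_zero]
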